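-- pv_equiv track=rewrite | github.com/suyog-pipliwaal/Competitive-programming-Solution | leetcode/Smooth Descent Periods of a Stock.py | all_descent_periods
-- ===== SOURCE A (Python) =====
-- def all_descent_periods(prices:list[int]) -> list:
--     start = 0
--     result = []
--     for i in range(len(prices)):
--         if i > 0 and prices[i]!=prices[i-1]-1:
--             start = i
--         for j in range(start, i+1):
--             result.append(prices[j:i+1])
--     return result
-- ===== SOURCE B (Python) =====
-- def all_descent_periods(prices: list[int]) -> list:
--     # Alternative algorithm: split prices into maximal smooth-descent runs, then
--     # generate every period arithmetically from the run's head value (no slicing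
--     # of prices at all).
--     result = []
--     rest = prices
--     while rest:
--         v0 = rest[0]
--         L = 1
--         while L < len(rest) and rest[L] == v0 - L:
--             L += 1
--         for e in range(L):
--             for j in range(e + 1):
--                 result.append(list(range(v0 - j, v0 - e - 1, -1)))
--         rest = rest[L:]
--     return result
-- ===== Notes on version B (the rewrite author's own statement) =====
-- stated objective: alternative
-- what changed: Instead of A's per-index loop that tracks a run-start variable and slices prices for every period, B splits prices into maximal smooth-descent runs in one scan and generates every period arithmetically (list(range(v0-j, v0-e-1, -1))) from each run's head value, never slicing prices.
import Mathlib
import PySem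

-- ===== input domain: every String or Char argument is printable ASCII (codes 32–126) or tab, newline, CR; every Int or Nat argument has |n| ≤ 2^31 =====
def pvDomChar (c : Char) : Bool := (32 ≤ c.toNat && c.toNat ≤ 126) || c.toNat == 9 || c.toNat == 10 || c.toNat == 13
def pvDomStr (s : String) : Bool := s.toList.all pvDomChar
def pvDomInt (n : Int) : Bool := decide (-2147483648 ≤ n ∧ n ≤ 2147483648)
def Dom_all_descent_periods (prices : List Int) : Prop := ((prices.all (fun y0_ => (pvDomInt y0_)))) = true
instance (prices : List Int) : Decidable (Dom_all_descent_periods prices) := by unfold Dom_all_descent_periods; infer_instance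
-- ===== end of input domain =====

-- B re-implements the function by splitting prices into maximal smooth-descent runs and
-- generating every period arithmetically from each run's head value (objective: alternative).

-- ===== PORT A =====
-- A's loop body (start update, then inner append loop as ++ map over the j-range).
def pvStepA (prices : List Int) (st : Int × List (List Int)) (i : Int) : Int × List (List Int) :=
  let start := if 0 < i ∧ ¬ (PySem.List.pyGetD prices i 0 = PySem.List.pyGetD prices (i-1) 0 - 1)
               then i else st.1
  (start, st.2 ++ (PySem.List.pyRange start (i+1) 1).map
      (fun j => PySem.List.slice prices (some j) (some (i+1))))

def all_descent_periods (prices : List Int) : List (List Int) :=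
  ((PySem.List.pyRange 0 prices.length 1).foldl (pvStepA prices) (0, [])).2

-- ===== PORT B =====
-- inner while: `while L < len(rest) and rest[L] == v0 - L: L += 1`
-- (rest[L] with 0 ≤ L < len(rest) guarded by the short-circuit `and` is rest[L]?;
--  the fuel argument only makes the loop total: rest.length - L steps always suffice).
def pvRunLenF (v0 : Int) (rest : List Int) (L : Nat) : Nat → Nat
  | 0 => L
  | fuel+1 =>
    if L < rest.length ∧ rest[L]? = some (v0 - (L : Int)) then pvRunLenF v0 rest (L+1) fuel else L

def pvRunLen (v0 : Int) (rest : List Int) (L : Nat) : Nat :=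
  pvRunLenF v0 rest L (rest.length - L)

-- the two nested emitting for-loops: list(range(v0-j, v0-e-1, -1)) for j ≤ e < L
def pvBlocks (v0 : Int) (L : Nat) : List (List Int) :=
  (List.range L).flatMap (fun (e : Nat) =>
    (List.range (e+1)).map (fun (j : Nat) => PySem.List.pyRange (v0 - (j:Int)) (v0 - (e:Int) - 1) (-1)))

-- outer while: peel one maximal run, emit its periods, continue on rest[L:] (= drop L, 0 ≤ L);
-- fuel = length of the remaining list is enough since each pass drops L ≥ 1 elements.
def pvAltLoopF (rest : List Int) (result : List (List Int)) : Nat → List (List Int)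
  | 0 => result
  | fuel+1 =>
    if rest = [] then result
    else
      let v0 := rest.headD 0
      let L := pvRunLen v0 rest 1
      pvAltLoopF (rest.drop L) (result ++ pvBlocks v0 L) fuel

def all_descent_periods_alt (prices : List Int) : List (List Int) :=
  pvAltLoopF prices [] prices.length

-- ===== PRECONDITION & SPEC =====
def Spec_all_descent_periods (prices : List Int) (out : List (List Int)) : Prop := out = all_descent_periods_alt prices
instance (prices : List Int) (out : List (List Int)) : Decidable (Spec_all_descent_periods prices out) := by unfold Spec_all_descent_periods; infer_instance

-- ===== CLAIM (what is proved, stated in full; the proofs are below) =====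
def Claim_equal_all_descent_periods : Prop := ∀ (prices : List Int), Dom_all_descent_periods prices → Spec_all_descent_periods prices (all_descent_periods prices)

-- ===== LEMMAS AND PROOFS =====

-- Nat-indexed version of A's step (proof-side only)
def pvStepN (P : List Int) (st : Nat × List (List Int)) (i : Nat) : Nat × List (List Int) :=
  let s := if 0 < i ∧ ¬ (P.getD i 0 = P.getD (i-1) 0 - 1) then i else st.1
  (s, st.2 ++ (List.range (i+1-s)).map (fun t => (P.drop (s+t)).take (i+1-(s+t))))

def pvChain (v0 : Int) (L : Nat) : List Int := (List.range L).map (fun (k : Nat) => v0 - (k:Int))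

def pvBlocksN (v0 : Int) (L : Nat) : List (List Int) :=
  (List.range L).flatMap (fun (e : Nat) =>
    (List.range (e+1)).map (fun (j : Nat) => pvChain (v0 - (j:Int)) (e+1-j)))

theorem pvChain_take (v0 : Int) (L n : Nat) (h : n ≤ L) : (pvChain v0 L).take n = pvChain v0 n := by
  apply List.ext_getElem
  · simp only [pvChain, List.length_take, List.length_map, List.length_range]; omega
  · intro i h1 h2
    simp only [pvChain, List.getElem_take, List.getElem_map, List.getElem_range]

theorem pvChain_drop (v0 : Int) (L t : Nat) : (pvChain v0 L).drop t = pvChain (v0 - t) (L - t) := by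
  apply List.ext_getElem
  · simp only [pvChain, List.length_drop, List.length_map, List.length_range]
  · intro i h1 h2
    simp only [pvChain, List.getElem_drop, List.getElem_map, List.getElem_range]
    push_cast
    ring

theorem pvChain_getD (v0 : Int) (L i : Nat) (h : i < L) (rest : List Int) :
    (pvChain v0 L ++ rest).getD i 0 = v0 - i := by
  have hl : i < (pvChain v0 L).length := by
    simp only [pvChain, List.length_map, List.length_range]; omega
  rw [List.getD_eq_getElem?_getD, List.getElem?_append_left hl]
  simp only [pvChain, List.getElem?_map, List.getElem?_range, h]
  rfl

theorem pvBlocks_eq (v0 : Int) (L : Nat) : pvBlocks v0 L = pvBlocksN v0 L := by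
  unfold pvBlocks pvBlocksN
  refine List.flatMap_congr (fun e he => ?_)
  refine List.map_congr_left (fun j hj => ?_)
  simp only [List.mem_range] at hj
  rw [PySem.List.pyRange_neg_one]
  have h1 : ((v0 - (j:Int)) - (v0 - (e:Int) - 1)).toNat = e + 1 - j := by omega
  rw [h1]
  rfl

theorem pvGroup_eq (P : List Int) (s' i : Nat) :
    (PySem.List.pyRange (s' : Int) ((i:Int)+1) 1).map
        (fun j => PySem.List.slice P (some j) (some ((i:Int)+1)))
      = (List.range (i+1-s')).map (fun t => (P.drop (s'+t)).take (i+1-(s'+t))) := by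
  rw [PySem.List.pyRange_one, List.map_map]
  have h1 : (((i:Int)+1) - (s':Int)).toNat = i + 1 - s' := by omega
  rw [h1]
  refine List.map_congr_left (fun t ht => ?_)
  simp only [Function.comp_apply]
  have h2 : (s':Int) + (t:Int) = ((s' + t : Nat) : Int) := by push_cast; ring
  have h3 : (i:Int) + 1 = ((i + 1 : Nat) : Int) := by push_cast; ring
  rw [h2, h3, PySem.List.slice_natCast]

theorem pvStepA_eq (P : List Int) (i s : Nat) (acc : List (List Int)) :
    pvStepA P ((s:Int), acc) (i:Int)
      = (((pvStepN P (s, acc) i).1 : Int), (pvStepN P (s, acc) i).2) := by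
  unfold pvStepA pvStepN
  have hcond : (0 < (i:Int) ∧ ¬ (PySem.List.pyGetD P (i:Int) 0 = PySem.List.pyGetD P ((i:Int)-1) 0 - 1))
      ↔ (0 < i ∧ ¬ (P.getD i 0 = P.getD (i-1) 0 - 1)) := by
    by_cases hi : 0 < i
    · have h1 : (i:Int) - 1 = ((i - 1 : Nat) : Int) := by omega
      rw [h1]
      simp only [PySem.List.pyGetD_natCast, Int.natCast_pos]
    · have hi0 : i = 0 := by omega
      subst hi0; simp
  rw [if_congr hcond rfl rfl, ← apply_ite (fun n : Nat => (n:Int))]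
  simp only
  rw [pvGroup_eq]

theorem pvFoldA_eq (P : List Int) (m k s : Nat) (acc : List (List Int)) :
    (PySem.List.pyRange (k:Int) ((k:Int)+(m:Int)) 1).foldl (pvStepA P) ((s:Int), acc)
      = ((((List.range' k m).foldl (pvStepN P) (s, acc)).1 : Int),
          ((List.range' k m).foldl (pvStepN P) (s, acc)).2) := by
  induction m generalizing k s acc with
  | zero => simp [PySem.List.pyRange_one_eq_nil]
  | succ m ih =>
    have h1 : (k:Int) < (k:Int) + ((m+1 : Nat) : Int) := by push_cast; omega
    rw [PySem.List.pyRange_one_cons h1, List.range'_succ, List.foldl_cons, List.foldl_cons,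
        pvStepA_eq]
    have h2 : (k:Int) + 1 = ((k+1 : Nat) : Int) := by push_cast; ring
    have h3 : (k:Int) + ((m+1 : Nat) : Int) = ((k+1 : Nat) : Int) + (m : Int) := by push_cast; ring
    rw [h2, h3, ih]

theorem pvFoldN_acc (P : List Int) (is : List Nat) (s : Nat) (acc : List (List Int)) :
    is.foldl (pvStepN P) (s, acc)
      = ((is.foldl (pvStepN P) (s, [])).1, acc ++ (is.foldl (pvStepN P) (s, [])).2) := by
  induction is generalizing s acc with
  | nil => simp
  | cons i is ih =>
    simp only [List.foldl_cons]
    have hstep : pvStepN P (s, acc) i = ((pvStepN P (s, []) i).1, acc ++ (pvStepN P (s, []) i).2) := by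
      simp [pvStepN]
    rw [hstep, ih, ih ((pvStepN P (s, []) i).1) ((pvStepN P (s, []) i).2)]
    simp

theorem pvRunLenF_ge (v0 : Int) (rest : List Int) : ∀ (fuel L : Nat),
    L ≤ pvRunLenF v0 rest L fuel := by
  intro fuel
  induction fuel with
  | zero => intro L; simp [pvRunLenF]
  | succ fuel ih =>
    intro L
    simp only [pvRunLenF]
    split_ifs with h
    · exact le_trans (by omega) (ih (L+1))
    · exact le_refl L

theorem pvAltLoopF_acc : ∀ (fuel : Nat) (rest : List Int) (acc : List (List Int)),
    pvAltLoopF rest acc fuel = acc ++ pvAltLoopF rest [] fuel := by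
  intro fuel
  induction fuel with
  | zero => intro rest acc; simp [pvAltLoopF]
  | succ fuel ih =>
    intro rest acc
    by_cases hr : rest = []
    · simp [pvAltLoopF, hr]
    · simp only [pvAltLoopF, hr, if_false, List.nil_append]
      rw [ih (rest.drop (pvRunLen (rest.headD 0) rest 1)) (acc ++ pvBlocks (rest.headD 0) (pvRunLen (rest.headD 0) rest 1)),
          ih (rest.drop (pvRunLen (rest.headD 0) rest 1)) (pvBlocks (rest.headD 0) (pvRunLen (rest.headD 0) rest 1))]
      simp

theorem pvRunLenF_spec (v0 : Int) (rest : List Int) : ∀ (fuel : Nat) (s : Nat),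
    rest.length - s ≤ fuel →
    (∀ k, k < s → rest[k]? = some (v0 - (k:Int))) →
    (∀ k, k < pvRunLenF v0 rest s fuel → rest[k]? = some (v0 - (k:Int)))
    ∧ ¬ (pvRunLenF v0 rest s fuel < rest.length
          ∧ rest[pvRunLenF v0 rest s fuel]? = some (v0 - (pvRunLenF v0 rest s fuel : Int)))
    ∧ (s ≤ rest.length → pvRunLenF v0 rest s fuel ≤ rest.length) := by
  intro fuel
  induction fuel with
  | zero =>
    intro s hf hbase
    have hc : ¬ (s < rest.length ∧ rest[s]? = some (v0 - (s:Int))) := by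
      rintro ⟨h1, -⟩; omega
    simp only [pvRunLenF]
    exact ⟨hbase, hc, fun h => by omega⟩
  | succ fuel ih =>
    intro s hf hbase
    simp only [pvRunLenF]
    by_cases hc : (s < rest.length ∧ rest[s]? = some (v0 - (s:Int)))
    · rw [if_pos hc]
      have hbase' : ∀ k, k < s + 1 → rest[k]? = some (v0 - (k:Int)) := by
        intro k hk
        rcases Nat.lt_succ_iff_lt_or_eq.mp hk with h | h
        · exact hbase k h
        · subst h; exact hc.2
      obtain ⟨a, b, c⟩ := ih (s+1) (by omega) hbase'
      exact ⟨a, b, fun _ => c (by omega)⟩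
    · rw [if_neg hc]
      exact ⟨hbase, hc, fun h => by push_neg at hc; omega⟩

theorem pvPhase1 (v0 : Int) (L : Nat) (rest : List Int) (i : Nat) (hi : i ≤ L) :
    (List.range' 0 i).foldl (pvStepN (pvChain v0 L ++ rest)) (0, [])
      = (0, pvBlocksN v0 i) := by
  induction i with
  | zero => simp [pvBlocksN]
  | succ i ih =>
    have hii : i ≤ L := by omega
    have hrc : List.range' 0 (i+1) = List.range' 0 i ++ [i] := by
      simp [List.range'_concat]
    rw [hrc, List.foldl_append, ih hii]
    simp only [List.foldl_cons, List.foldl_nil]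
    have hcond : ¬ (0 < i ∧ ¬ ((pvChain v0 L ++ rest).getD i 0 = (pvChain v0 L ++ rest).getD (i-1) 0 - 1)) := by
      rintro ⟨hpos, hne⟩
      apply hne
      rw [pvChain_getD v0 L i (by omega) rest, pvChain_getD v0 L (i-1) (by omega) rest]
      have : ((i-1 : Nat) : Int) = (i : Int) - 1 := by omega
      rw [this]; ring
    show pvStepN (pvChain v0 L ++ rest) (0, pvBlocksN v0 i) i = (0, pvBlocksN v0 (i+1))
    unfold pvStepN
    rw [if_neg hcond]
    simp only [Nat.zero_add, Nat.sub_zero]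
    have hgrp : (List.range (i+1)).map (fun t => ((pvChain v0 L ++ rest).drop t).take (i+1-t))
        = (List.range (i+1)).map (fun (j : Nat) => pvChain (v0 - (j:Int)) (i+1-j)) := by
      refine List.map_congr_left (fun t ht => ?_)
      simp only [List.mem_range] at ht
      have hd : ((pvChain v0 L ++ rest).drop t) = pvChain (v0 - (t:Int)) (L - t) ++ rest := by
        rw [List.drop_append_of_le_length (by
          simp only [pvChain, List.length_map, List.length_range]; omega), pvChain_drop]
      rw [hd, List.take_append_of_le_length (by
          simp only [pvChain, List.length_map, List.length_range]; omega),
        pvChain_take _ _ _ (by omega)]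
    rw [hgrp]
    have : pvBlocksN v0 (i+1) = pvBlocksN v0 i
        ++ (List.range (i+1)).map (fun (j : Nat) => pvChain (v0 - (j:Int)) (i+1-j)) := by
      unfold pvBlocksN
      rw [List.range_succ, List.flatMap_append, List.flatMap_cons, List.flatMap_nil,
        List.append_nil, List.range_succ]
    rw [this]

theorem pvShift (pre rest : List Int) (m : Nat) : ∀ (k s : Nat) (acc : List (List Int)), 1 ≤ k →
    (List.range' (pre.length + k) m).foldl (pvStepN (pre ++ rest)) (pre.length + s, acc)
      = (pre.length + ((List.range' k m).foldl (pvStepN rest) (s, acc)).1,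
          ((List.range' k m).foldl (pvStepN rest) (s, acc)).2) := by
  induction m with
  | zero => intro k s acc hk; simp
  | succ m ih =>
    intro k s acc hk
    rw [List.range'_succ, List.range'_succ, List.foldl_cons, List.foldl_cons]
    have hgd : ∀ x : Nat, (pre ++ rest).getD (pre.length + x) 0 = rest.getD x 0 := by
      intro x
      rw [List.getD_eq_getElem?_getD, List.getElem?_append_right (by omega),
        Nat.add_sub_cancel_left, ← List.getD_eq_getElem?_getD]
    have hstep : pvStepN (pre ++ rest) (pre.length + s, acc) (pre.length + k)
        = (pre.length + (pvStepN rest (s, acc) k).1, (pvStepN rest (s, acc) k).2) := by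
      unfold pvStepN
      dsimp only
      have hc : (0 < pre.length + k ∧ ¬ ((pre ++ rest).getD (pre.length + k) 0 = (pre ++ rest).getD (pre.length + k - 1) 0 - 1))
          ↔ (0 < k ∧ ¬ (rest.getD k 0 = rest.getD (k-1) 0 - 1)) := by
        have e1 : pre.length + k - 1 = pre.length + (k - 1) := by omega
        rw [e1, hgd, hgd]
        constructor
        · rintro ⟨-, h2⟩; exact ⟨hk, h2⟩
        · rintro ⟨-, h2⟩; exact ⟨by omega, h2⟩
      rw [if_congr hc rfl rfl]
      have hite : (if (0 < k ∧ ¬ (rest.getD k 0 = rest.getD (k-1) 0 - 1)) then pre.length + k else pre.length + s)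
          = pre.length + (if (0 < k ∧ ¬ (rest.getD k 0 = rest.getD (k-1) 0 - 1)) then k else s) := by
        split_ifs <;> rfl
      rw [hite]
      set s2 := if (0 < k ∧ ¬ (rest.getD k 0 = rest.getD (k-1) 0 - 1)) then k else s with hs2
      have harg : pre.length + k + 1 - (pre.length + s2) = k + 1 - s2 := by omega
      rw [harg]
      have hmap : (List.range (k+1-s2)).map (fun t => ((pre ++ rest).drop (pre.length + s2 + t)).take (pre.length + k + 1 - (pre.length + s2 + t)))
          = (List.range (k+1-s2)).map (fun t => (rest.drop (s2 + t)).take (k + 1 - (s2 + t))) := by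
        refine List.map_congr_left (fun t ht => ?_)
        have e3 : pre.length + k + 1 - (pre.length + s2 + t) = k + 1 - (s2 + t) := by omega
        rw [e3, show pre.length + s2 + t = pre.length + (s2 + t) from by omega, List.drop_append,
          List.drop_eq_nil_of_le (by omega), List.nil_append, Nat.add_sub_cancel_left]
      rw [hmap]
    rw [hstep, Nat.add_assoc, ih (k+1) (pvStepN rest (s, acc) k).1 (pvStepN rest (s, acc) k).2 (by omega)]


theorem pvRange'_split (a b : Nat) : List.range' 0 (a+b) = List.range' 0 a ++ List.range' a b := by
  have := List.range'_append (s := 0) (m := a) (n := b) (step := 1)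
  simpa using this.symm

theorem pvASplit (v0 : Int) (L : Nat) (rest : List Int) (hL : 1 ≤ L)
    (hb : rest = [] ∨ rest[0]? ≠ some (v0 - (L:Int))) :
    ((List.range' 0 (L + rest.length)).foldl (pvStepN (pvChain v0 L ++ rest)) (0, [])).2
      = pvBlocksN v0 L ++ ((List.range' 0 rest.length).foldl (pvStepN rest) (0, [])).2 := by
  cases rest with
  | nil =>
    simp only [List.length_nil, Nat.add_zero, List.range'_zero, List.foldl_nil]
    rw [pvPhase1 v0 L [] L (le_refl L)]
    simp
  | cons r0 rest' =>
    have hplen : (pvChain v0 L).length = L := by simp [pvChain]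
    have hr0 : r0 ≠ v0 - (L:Int) := by
      rcases hb with h | h
      · exact absurd h (List.cons_ne_nil r0 rest')
      · intro hEq; exact h (by simp [hEq])
    have h1 : List.range' 0 (L + (r0::rest').length)
        = List.range' 0 L ++ (L :: List.range' (L+1) rest'.length) := by
      rw [List.length_cons, pvRange'_split L (rest'.length+1), List.range'_succ]
    rw [h1, List.foldl_append, pvPhase1 v0 L (r0::rest') L (le_refl L), List.foldl_cons]
    have hstep2 : pvStepN (pvChain v0 L ++ (r0::rest')) (0, pvBlocksN v0 L) L
        = (L, pvBlocksN v0 L ++ [[r0]]) := by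
      unfold pvStepN
      dsimp only
      have hdropL : (pvChain v0 L ++ (r0::rest')).drop L = r0 :: rest' := by
        rw [List.drop_append, List.drop_eq_nil_of_le (by omega)]
        simp [hplen]
      have hcondT : (0 < L ∧ ¬ ((pvChain v0 L ++ (r0::rest')).getD L 0
          = (pvChain v0 L ++ (r0::rest')).getD (L-1) 0 - 1)) := by
        refine ⟨by omega, ?_⟩
        have hgL : (pvChain v0 L ++ (r0::rest')).getD L 0 = r0 := by
          rw [List.getD_eq_getElem?_getD, List.getElem?_append_right (by omega)]
          simp [hplen]
        have hgL1 : (pvChain v0 L ++ (r0::rest')).getD (L-1) 0 = v0 - ((L-1 : Nat) : Int) :=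
          pvChain_getD v0 L (L-1) (by omega) _
        rw [hgL, hgL1]
        intro hEq
        apply hr0
        rw [hEq]
        have : ((L-1 : Nat) : Int) = (L : Int) - 1 := by omega
        rw [this]; ring
      rw [if_pos hcondT]
      have harg : L + 1 - L = 1 := by omega
      rw [harg]
      simp [hdropL]
    rw [hstep2]
    have hshift := pvShift (pvChain v0 L) (r0::rest') rest'.length 1 0
        (pvBlocksN v0 L ++ [[r0]]) (by omega)
    rw [hplen] at hshift
    simp only [Nat.add_zero] at hshift
    rw [hshift]
    have hstep0 : pvStepN (r0::rest') (0, ([] : List (List Int))) 0 = (0, [[r0]]) := by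
      unfold pvStepN
      dsimp only
      rw [if_neg (by rintro ⟨h, -⟩; omega)]
      simp
    have hR : List.range' 0 (r0::rest').length = 0 :: List.range' 1 rest'.length := by
      rw [List.length_cons, List.range'_succ]
    rw [hR, List.foldl_cons, hstep0]
    rw [pvFoldN_acc (r0::rest') (List.range' 1 rest'.length) 0 (pvBlocksN v0 L ++ [[r0]]),
        pvFoldN_acc (r0::rest') (List.range' 1 rest'.length) 0 [[r0]]]
    simp

theorem pvMain' : ∀ (n : Nat) (P : List Int), P.length ≤ n →
    ((List.range' 0 P.length).foldl (pvStepN P) (0, [])).2 = pvAltLoopF P [] n := by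
  intro n
  induction n with
  | zero =>
    intro P h
    have hP : P = [] := by cases P <;> simp_all
    subst hP
    simp [pvAltLoopF]
  | succ n ih =>
    intro P hn
    cases P with
    | nil => simp [pvAltLoopF]
    | cons r0 tl =>
      obtain ⟨L, hLdef⟩ : ∃ L, L = pvRunLen r0 (r0::tl) 1 := ⟨_, rfl⟩
      have hLF : pvRunLen r0 (r0::tl) 1 = pvRunLenF r0 (r0::tl) 1 ((r0::tl).length - 1) := rfl
      have hL1 : 1 ≤ L := hLdef ▸ (hLF ▸ pvRunLenF_ge r0 (r0::tl) ((r0::tl).length - 1) 1)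
      have hbase : ∀ k : Nat, k < 1 → (r0::tl)[k]? = some (r0 - (k:Int)) := by
        intro k hk
        have : k = 0 := by omega
        subst this
        simp
      obtain ⟨h1, h2, h3⟩ := pvRunLenF_spec r0 (r0::tl) ((r0::tl).length - 1) 1 (by omega) hbase
      rw [← hLF, ← hLdef] at h1 h2 h3
      have hLlen : L ≤ (r0::tl).length := h3 (by simp)
      have htake : (r0::tl).take L = pvChain r0 L := by
        apply List.ext_getElem
        · simp only [List.length_take, pvChain, List.length_map, List.length_range]; omega
        · intro i hi1 hi2
          have hiL : i < L := by
            simp only [List.length_take] at hi1; omega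
          obtain ⟨hlt, hv⟩ := List.getElem?_eq_some_iff.mp (h1 i hiL)
          simp only [List.getElem_take, pvChain, List.getElem_map, List.getElem_range]
          exact hv
      have hP2 : r0::tl = pvChain r0 L ++ (r0::tl).drop L := by
        have h := List.take_append_drop L (r0::tl)
        rw [htake] at h
        exact h.symm
      have hb : (r0::tl).drop L = [] ∨ ((r0::tl).drop L)[0]? ≠ some (r0 - (L:Int)) := by
        by_cases hLL : L < (r0::tl).length
        · right
          rw [List.getElem?_drop]
          intro hEq
          exact h2 ⟨hLL, hEq⟩
        · left
          rw [List.drop_eq_nil_iff]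
          omega
      have halt : pvAltLoopF (r0::tl) [] (n+1) = pvBlocks r0 L ++ pvAltLoopF ((r0::tl).drop L) [] n := by
        rw [show pvAltLoopF (r0::tl) [] (n+1)
            = pvAltLoopF ((r0::tl).drop (pvRunLen ((r0::tl).headD 0) (r0::tl) 1))
                ([] ++ pvBlocks ((r0::tl).headD 0) (pvRunLen ((r0::tl).headD 0) (r0::tl) 1)) n from by
          simp [pvAltLoopF]]
        simp only [List.headD_cons, List.nil_append]
        rw [← hLdef]
        exact pvAltLoopF_acc n ((r0::tl).drop L) _
      have hmain : ((List.range' 0 (r0::tl).length).foldl (pvStepN (r0::tl)) (0, [])).2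
          = pvBlocksN r0 L
            ++ ((List.range' 0 ((r0::tl).drop L).length).foldl (pvStepN ((r0::tl).drop L)) (0, [])).2 := by
        conv_lhs => rw [hP2]
        rw [show (pvChain r0 L ++ (r0::tl).drop L).length = L + ((r0::tl).drop L).length from by
          simp [pvChain]]
        exact pvASplit r0 L ((r0::tl).drop L) hL1 hb
      have hIH := ih ((r0::tl).drop L) (by
        simp only [List.length_drop, List.length_cons] at *
        omega)
      rw [hmain, hIH, halt, pvBlocks_eq]

-- ===== VERDICT (by name: the statement is the Claim_ definition above) =====
theorem all_descent_periods_spec : Claim_equal_all_descent_periods := by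
  intro prices _
  unfold Spec_all_descent_periods all_descent_periods all_descent_periods_alt
  have h := pvFoldA_eq prices prices.length 0 0 []
  simp only [Nat.cast_zero, zero_add] at h
  rw [h]
  exact pvMain' prices.length prices (le_refl _)
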